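-- pv_equiv track=rewrite | github.com/bingdongni/NeuroMinecraftGenesis-NMG- | core/symbolic/concept_hierarchy.py | _are_in_same_context
-- ===== SOURCE A (Python) =====
-- from typing import Dict, List, Set, Tuple, Optional, Any, Union
--
-- def _are_in_same_context(entity1: str, entity2: str, entities: List[Tuple[str, str, Dict[str, Any]]]) -> bool:
--     """检查两个实体是否在同一上下文中"""
--     # 简化实现：假设列表中的相邻实体在同一上下文
--     entity_names = [entity[0] for entity in entities]
--
--     try:
--         idx1 = entity_names.index(entity1)
--         idx2 = entity_names.index(entity2)
--
--         # 检查是否相邻或在窗口范围内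
--         return abs(idx1 - idx2) <= 2
--     except ValueError:
--         return False
-- ===== SOURCE B (Python) =====
-- def _are_in_same_context(entity1, entity2, entities):
--     """Stop at the first tuple named either entity; the other name must then
--     appear among the first three tuples of that suffix (window membership,
--     no indices computed or compared)."""
--     if entity1 == entity2:
--         return any(e[0] == entity1 for e in entities)
--     for i, ent in enumerate(entities):
--         name = ent[0]
--         if name == entity1 or name == entity2:
--             other = entity2 if name == entity1 else entity1
--             return any(e[0] == other for e in entities[i:i + 3])
--     return False
-- ===== Notes on version B (the rewrite author's own statement) =====
-- stated objective: alternative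
-- what changed: Instead of computing both first-occurrence indices with .index() and comparing |idx1-idx2|<=2, B scans to the FIRST tuple named either entity and decides by membership of the other name in that suffix's 3-element window, with a separate equal-names membership case; no indices are compared at all.
import Mathlib
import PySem

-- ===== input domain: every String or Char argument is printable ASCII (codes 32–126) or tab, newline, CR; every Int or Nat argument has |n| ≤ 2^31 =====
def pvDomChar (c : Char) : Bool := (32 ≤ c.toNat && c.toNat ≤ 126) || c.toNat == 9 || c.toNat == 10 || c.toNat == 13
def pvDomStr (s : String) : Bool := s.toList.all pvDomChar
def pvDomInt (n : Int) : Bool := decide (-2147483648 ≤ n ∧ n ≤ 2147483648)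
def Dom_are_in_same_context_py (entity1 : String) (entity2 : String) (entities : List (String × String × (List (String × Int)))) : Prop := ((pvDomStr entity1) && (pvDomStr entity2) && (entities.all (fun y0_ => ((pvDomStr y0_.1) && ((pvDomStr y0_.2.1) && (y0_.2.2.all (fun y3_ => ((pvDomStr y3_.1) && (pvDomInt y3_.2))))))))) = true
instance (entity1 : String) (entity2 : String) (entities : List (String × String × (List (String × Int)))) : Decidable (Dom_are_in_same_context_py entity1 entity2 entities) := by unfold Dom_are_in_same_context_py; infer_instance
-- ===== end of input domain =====

-- ===== PORT A =====
-- One honest line: B replaces A's two first-occurrence indices + |idx1-idx2|<=2 by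
-- an early-exit scan to the first tuple named either entity plus a 3-element window
-- membership test for the other name (alternative algorithm, same O(n) cost).
def are_in_same_context_py (entity1 : String) (entity2 : String) (entities : List (String × String × (List (String × Int)))) : Bool :=
  let entity_names := entities.map (fun e => e.1)
  match PySem.List.index? entity_names entity1, PySem.List.index? entity_names entity2 with
  | some idx1, some idx2 => decide ((((idx1 : Int) - (idx2 : Int)).natAbs : Int) ≤ 2)
  | _, _ => false

-- ===== PORT B =====
-- Source B's `any(e[0] == name for e in l)`
def pvAnyName (name : String) (l : List (String × String × (List (String × Int)))) : Bool :=
  l.any (fun e => e.1 == name)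

-- Source B's for-loop with early return; the slice entities[i:i+3] is the first 3
-- tuples of the current suffix
def pvFindLoop (e1 e2 : String) : List (String × String × (List (String × Int))) → Bool
  | [] => false
  | ent :: rest =>
    if ent.1 == e1 || ent.1 == e2 then
      pvAnyName (if ent.1 == e1 then e2 else e1) ((ent :: rest).take 3)
    else pvFindLoop e1 e2 rest

def are_in_same_context_py_alt (entity1 : String) (entity2 : String) (entities : List (String × String × (List (String × Int)))) : Bool :=
  if entity1 == entity2 then pvAnyName entity1 entities
  else pvFindLoop entity1 entity2 entities

-- ===== PRECONDITION & SPEC =====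
def Spec_are_in_same_context_py (entity1 : String) (entity2 : String) (entities : List (String × String × (List (String × Int)))) (out : Bool) : Prop := out = are_in_same_context_py_alt entity1 entity2 entities
instance (entity1 : String) (entity2 : String) (entities : List (String × String × (List (String × Int)))) (out : Bool) : Decidable (Spec_are_in_same_context_py entity1 entity2 entities out) := by unfold Spec_are_in_same_context_py; infer_instance

-- ===== CLAIM (what is proved, stated in full; the proofs are below) =====
def Claim_equal_are_in_same_context_py : Prop := ∀ (entity1 : String) (entity2 : String) (entities : List (String × String × (List (String × Int)))), Dom_are_in_same_context_py entity1 entity2 entities → Spec_are_in_same_context_py entity1 entity2 entities (are_in_same_context_py entity1 entity2 entities)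

-- ===== LEMMAS AND PROOFS =====

-- A's body, with its let-binding unfolded (definitional)
theorem pvA_eq (e1 e2 : String) (l : List (String × String × (List (String × Int)))) :
    are_in_same_context_py e1 e2 l =
      (match PySem.List.index? (l.map (fun e => e.1)) e1,
             PySem.List.index? (l.map (fun e => e.1)) e2 with
       | some idx1, some idx2 => decide ((((idx1 : Int) - (idx2 : Int)).natAbs : Int) ≤ 2)
       | _, _ => false) := rfl

-- first-occurrence index ≤ n  ↔  membership in the (n+1)-element window
theorem pvIndexWindow (x : String) (l : List (String × String × (List (String × Int)))) (n : Nat) :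
    (match PySem.List.index? (l.map (fun e => e.1)) x with
      | some k => decide (k ≤ n)
      | none => false) = pvAnyName x (l.take (n + 1)) := by
  induction l generalizing n with
  | nil => rfl
  | cons h t ih =>
    rw [show (h :: t).map (fun e => e.1) = h.1 :: t.map (fun e => e.1) from rfl]
    by_cases hx : h.1 = x
    · subst hx
      rw [PySem.List.index?_cons_self]
      simp [pvAnyName]
    · rw [PySem.List.index?_cons_of_ne _ hx]
      cases n with
      | zero =>
        cases hidx : PySem.List.index? (t.map (fun e => e.1)) x with
        | none => simp [pvAnyName, hx]
        | some k => simp [pvAnyName, hx]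
      | succ m =>
        rw [List.take_succ_cons]
        simp only [pvAnyName, List.any_cons]
        rw [show (h.1 == x) = false from by simp [hx]]
        rw [Bool.false_or, ← pvAnyName, ← ih m]
        cases PySem.List.index? (t.map (fun e => e.1)) x with
        | none => rfl
        | some k => simp

theorem pvMain (e1 e2 : String) (l : List (String × String × (List (String × Int)))) :
    are_in_same_context_py e1 e2 l = are_in_same_context_py_alt e1 e2 l := by
  by_cases heq : e1 = e2
  · subst heq
    rw [pvA_eq]
    unfold are_in_same_context_py_alt
    simp only [beq_self_eq_true, if_true]
    cases hidx : PySem.List.index? (l.map (fun e => e.1)) e1 with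
    | none =>
      rw [PySem.List.index?_eq_none_iff] at hidx
      simp only [pvAnyName]
      symm
      rw [List.any_eq_false]
      intro e he
      simp only [beq_iff_eq]
      intro hfst
      exact hidx (by rw [← hfst]; exact List.mem_map_of_mem (f := fun e => e.1) he)
    | some k =>
      have hmem : e1 ∈ l.map (fun e => e.1) :=
        (PySem.List.index?_isSome_iff (xs := l.map (fun e => e.1)) (v := e1)).mp
          (by rw [hidx]; rfl)
      rcases List.mem_map.mp hmem with ⟨e, he, hfst⟩
      have h2 : ((((k : Int) - (k : Int)).natAbs : Int) ≤ 2) := by simp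
      show decide ((((k : Int) - (k : Int)).natAbs : Int) ≤ 2) = pvAnyName e1 l
      rw [decide_eq_true h2]
      symm
      simp only [pvAnyName]
      rw [List.any_eq_true]
      exact ⟨e, he, by simp [hfst]⟩
  · unfold are_in_same_context_py_alt
    rw [show (e1 == e2) = false from by simp [heq]]
    simp only [Bool.false_eq_true, if_false]
    induction l with
    | nil => rfl
    | cons h t ih =>
      rw [pvA_eq]
      rw [show (h :: t).map (fun e => e.1) = h.1 :: t.map (fun e => e.1) from rfl]
      by_cases h1 : h.1 = e1
      · -- first hit is e1: A gives |0 - idx2| ≤ 2 with idx2 = (index in t) + 1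
        have h2 : h.1 ≠ e2 := by rw [h1]; exact heq
        rw [show h.1 :: t.map (fun e => e.1) = e1 :: t.map (fun e => e.1) from by rw [h1]]
        rw [PySem.List.index?_cons_self, PySem.List.index?_cons_of_ne _ (h1 ▸ h2)]
        rw [pvFindLoop]
        rw [show (h.1 == e1) = true from by simp [h1]]
        simp only [Bool.true_or, if_true]
        rw [show (3 : Nat) = 2 + 1 from rfl, ← pvIndexWindow e2 (h :: t) 2]
        rw [show (h :: t).map (fun e => e.1) = h.1 :: t.map (fun e => e.1) from rfl]
        rw [PySem.List.index?_cons_of_ne _ h2]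
        cases PySem.List.index? (t.map (fun e => e.1)) e2 with
        | none => rfl
        | some k =>
          simp only [Option.map_some]
          rw [decide_eq_decide]
          omega
      · by_cases h2 : h.1 = e2
        · rw [show h.1 :: t.map (fun e => e.1) = e2 :: t.map (fun e => e.1) from by rw [h2]]
          rw [PySem.List.index?_cons_self, PySem.List.index?_cons_of_ne _ (h2 ▸ h1)]
          rw [pvFindLoop]
          rw [show (h.1 == e1) = false from by simp [h1],
              show (h.1 == e2) = true from by simp [h2]]
          simp only [Bool.false_or, if_true, Bool.false_eq_true, if_false]
          rw [show (3 : Nat) = 2 + 1 from rfl, ← pvIndexWindow e1 (h :: t) 2]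
          rw [show (h :: t).map (fun e => e.1) = h.1 :: t.map (fun e => e.1) from rfl]
          rw [PySem.List.index?_cons_of_ne _ h1]
          cases PySem.List.index? (t.map (fun e => e.1)) e1 with
          | none => rfl
          | some k =>
            simp only [Option.map_some]
            rw [decide_eq_decide]
            omega
        · rw [PySem.List.index?_cons_of_ne _ h1, PySem.List.index?_cons_of_ne _ h2]
          rw [pvFindLoop]
          rw [show (h.1 == e1) = false from by simp [h1],
              show (h.1 == e2) = false from by simp [h2]]
          simp only [Bool.false_or, Bool.false_eq_true, if_false]
          rw [← ih, pvA_eq]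
          cases PySem.List.index? (t.map (fun e => e.1)) e1 <;>
            cases PySem.List.index? (t.map (fun e => e.1)) e2 <;>
              simp only [Option.map_some, Option.map_none] <;>
              first
                | rfl
                | (rw [decide_eq_decide]; omega)

-- ===== VERDICT (by name: the statement is the Claim_ definition above) =====
theorem are_in_same_context_py_spec : Claim_equal_are_in_same_context_py := by
  intro e1 e2 l _
  unfold Spec_are_in_same_context_py
  exact pvMain e1 e2 l
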